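-- pv_equiv track=rewrite | github.com/omriz/coding_questions | 1025.py | get_minimal_list
-- ===== SOURCE A (Python) =====
-- import typing
--
-- def get_minimal_list(nums: typing.List[int]) -> typing.List[int]:
--     if len(nums) == 0:
--         return []
--     sum = 0
--     for i in range(len(nums)):
--         sum += nums[i]
--         if sum == 0:
--             return get_minimal_list(nums[i+1:])
--     return [nums[0]] + get_minimal_list(nums[1:])
-- ===== SOURCE B (Python) =====
-- import typing
--
-- def get_minimal_list(nums: typing.List[int]) -> typing.List[int]:
--     # One backward pass over prefix sums: at each position, the next position with
--     # an equal prefix sum starts a zero-sum segment to skip; a dict memoises, for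
--     # each prefix-sum value, the already-computed answer for the suffix at its
--     # nearest occurrence to the right.
--     n = len(nums)
--     P = [0] * (n + 1)
--     for k in range(n):
--         P[k + 1] = P[k] + nums[k]
--     res = []
--     seen = {P[n]: res}
--     for i in range(n - 1, -1, -1):
--         if P[i] in seen:
--             res = seen[P[i]]
--         else:
--             res = [nums[i]] + res
--         seen[P[i]] = res
--     return res
-- ===== Notes on version B (the rewrite author's own statement) =====
-- stated objective: faster
-- what changed: Replaces A's recursive rescans of each suffix (rebuilding prefix sums from every kept position) with one prefix-sum array and a single backward pass that memoises, in a dict keyed by prefix-sum value, the answer for the suffix at the nearest position to the right with that prefix sum.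
import Mathlib
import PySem

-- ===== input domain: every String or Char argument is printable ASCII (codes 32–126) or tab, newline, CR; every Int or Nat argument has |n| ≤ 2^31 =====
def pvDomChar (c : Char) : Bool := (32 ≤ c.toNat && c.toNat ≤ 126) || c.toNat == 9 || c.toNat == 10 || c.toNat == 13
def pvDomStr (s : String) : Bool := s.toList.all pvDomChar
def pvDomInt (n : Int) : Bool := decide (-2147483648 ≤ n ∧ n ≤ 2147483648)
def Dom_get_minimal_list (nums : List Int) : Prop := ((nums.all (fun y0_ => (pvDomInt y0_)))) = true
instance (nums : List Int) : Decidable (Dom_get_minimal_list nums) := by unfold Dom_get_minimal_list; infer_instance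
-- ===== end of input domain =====

-- B replaces A's recursive rescanning of every suffix with one prefix-sum pass and a single
-- backward pass memoising suffix answers in a dict keyed by prefix-sum value (faster).

-- ===== PORT A =====
-- the loop 'sum += nums[i]; if sum == 0: return …': index of the first zero running sum
def scanZero (s : Int) : List Int → Option Nat
  | [] => none
  | x :: xs => if s + x = 0 then some 0 else (scanZero (s + x) xs).map (· + 1)

def get_minimal_list (nums : List Int) : List Int :=
  match nums with
  | [] => []
  | x :: xs =>
    match scanZero 0 (x :: xs) with
    | some i => get_minimal_list ((x :: xs).drop (i + 1))
    | none => x :: get_minimal_list xs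
termination_by nums.length
decreasing_by
  · simp only [List.length_drop, List.length_cons]; omega
  · simp

-- ===== PORT B =====
-- the accumulation 'P[k+1] = P[k] + nums[k]': the list of running prefix sums, length n+1
def pfx (s : Int) : List Int → List Int
  | [] => [s]
  | x :: xs => s :: pfx (s + x) xs

-- the backward loop 'for i in range(n-1,-1,-1): …'; counter i means: indices i-1 … 0 remain
def bwd (nums P : List Int) : Nat → PySem.Dict Int (List Int) → List Int → List Int
  | 0, _, res => res
  | i + 1, seen, res =>
    let v := P[i]!
    let res' := match seen.get? v with
      | some r => r
      | none => nums[i]! :: res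
    bwd nums P i (seen.insert v res') res'

def get_minimal_list_alt (nums : List Int) : List Int :=
  let n := nums.length
  let P := pfx 0 nums
  bwd nums P n ((PySem.Dict.empty).insert (P[n]!) []) []


-- ===== PRECONDITION & SPEC =====
def Spec_get_minimal_list (nums : List Int) (out : List Int) : Prop := out = get_minimal_list_alt nums
instance (nums : List Int) (out : List Int) : Decidable (Spec_get_minimal_list nums out) := by unfold Spec_get_minimal_list; infer_instance

-- ===== CLAIM (what is proved, stated in full; the proofs are below) =====
def Claim_equal_get_minimal_list : Prop := ∀ (nums : List Int), Dom_get_minimal_list nums → Spec_get_minimal_list nums (get_minimal_list nums)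

-- ===== LEMMAS AND PROOFS =====

-- S nums j: the prefix sum of the first j elements (the value P[j] of B's array)
def S (nums : List Int) (j : Nat) : Int := (nums.take j).sum

-- minFrom nums i v: the smallest k with i ≤ k ≤ nums.length and S nums k = v
def minFrom (nums : List Int) (i : Nat) (v : Int) : Option Nat :=
  (List.range' i (nums.length + 1 - i)).find? (fun k => S nums k == v)

theorem pfx_get? (l : List Int) (s : Int) (i : Nat) (h : i ≤ l.length) :
    (pfx s l)[i]? = some (s + (l.take i).sum) := by
  induction l generalizing s i with
  | nil =>
    simp only [List.length_nil, Nat.le_zero] at h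
    subst h; simp [pfx]
  | cons x xs ih =>
    cases i with
    | zero => simp [pfx]
    | succ i =>
      simp only [pfx, List.getElem?_cons_succ, List.take_succ_cons, List.sum_cons]
      rw [ih (s + x) i (by simpa using h)]
      ring_nf

theorem pfx_getBang (l : List Int) (i : Nat) (h : i ≤ l.length) :
    (pfx 0 l)[i]! = S l i := by
  have := pfx_get? l 0 i h
  simp [List.getElem!_eq_getElem?_getD, this, S]

theorem scanZero_eq_find? (l : List Int) (s : Int) :
    scanZero s l = (List.range l.length).find? (fun m => s + (l.take (m+1)).sum == 0) := by
  induction l generalizing s with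
  | nil => simp [scanZero]
  | cons x xs ih =>
    simp only [scanZero, List.length_cons, List.range_succ_eq_map, List.find?_cons]
    by_cases h : s + x = 0
    · simp [h]
    · rw [if_neg h]
      rw [show (s + ((x :: xs).take (0+1)).sum == 0) = false from by simp [h]]
      rw [List.find?_map]
      have hcomp : ((fun m => s + ((x :: xs).take (m+1)).sum == 0) ∘ Nat.succ)
          = (fun m => (s + x) + (xs.take (m+1)).sum == 0) := by
        funext k
        simp [Function.comp, add_assoc]
      rw [hcomp, ← ih (s + x)]

theorem sum_take_drop (nums : List Int) (i j : Nat) :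
    (((nums.drop i).take j)).sum = S nums (i + j) - S nums i := by
  have h1 : (nums.take (i+j)).drop i = (nums.drop i).take j := by
    rw [List.drop_take]
    congr 1
    omega
  have h2 : ((nums.take (i+j)).take i).sum + ((nums.take (i+j)).drop i).sum = (nums.take (i+j)).sum :=
    List.sum_take_add_sum_drop ..
  rw [List.take_take] at h2
  have hmin : min i (i+j) = i := by omega
  rw [hmin] at h2
  rw [h1] at h2
  simp only [S]
  omega

theorem scanZero_drop (nums : List Int) (i : Nat) :
    scanZero 0 (nums.drop i) =
      (minFrom nums (i+1) (S nums i)).map (fun k => k - (i+1)) := by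
  rw [scanZero_eq_find?]
  unfold minFrom
  rw [List.range'_eq_map_range, List.find?_map]
  have hlen : (nums.drop i).length = nums.length - i := by simp
  have hc : nums.length + 1 - (i+1) = nums.length - i := by omega
  rw [hlen, hc]
  have hcomp : ((fun k => S nums k == S nums i) ∘ (fun m => i + 1 + m))
      = (fun m => 0 + ((nums.drop i).take (m+1)).sum == 0) := by
    funext m
    simp only [Function.comp, sum_take_drop]
    have he : i + (m + 1) = i + 1 + m := by omega
    rw [he]
    rcases eq_or_ne (S nums (i+1+m)) (S nums i) with hq | hq <;> simp [hq, sub_eq_zero]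
  rw [hcomp]
  cases (List.range (nums.length - i)).find? (fun m => 0 + ((nums.drop i).take (m+1)).sum == 0) with
  | none => simp
  | some m => simp

theorem minFrom_mem (nums : List Int) (i : Nat) (v : Int) (k : Nat)
    (h : minFrom nums i v = some k) : i ≤ k ∧ k ≤ nums.length ∧ S nums k = v := by
  unfold minFrom at h
  have hm := List.find?_some h
  have hmem := List.mem_of_find?_eq_some h
  rw [List.mem_range'_1] at hmem
  refine ⟨hmem.1, by omega, by simpa using hm⟩

theorem minFrom_step (nums : List Int) (i : Nat) (v : Int) (h : i ≤ nums.length) :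
    minFrom nums i v = if S nums i = v then some i else minFrom nums (i+1) v := by
  unfold minFrom
  have hc : nums.length + 1 - i = (nums.length + 1 - (i+1)) + 1 := by omega
  rw [hc, List.range'_succ, List.find?_cons]
  by_cases hv : S nums i = v
  · rw [show (S nums i == v) = true from by simp [hv], if_pos hv]
  · rw [show (S nums i == v) = false from by simp [hv], if_neg hv]

theorem A_drop (nums : List Int) (i : Nat) (h : i < nums.length) :
    get_minimal_list (nums.drop i) =
      match minFrom nums (i+1) (S nums i) with
      | some k => get_minimal_list (nums.drop k)
      | none => nums[i]! :: get_minimal_list (nums.drop (i+1)) := by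
  have hd : nums.drop i = nums[i] :: nums.drop (i+1) := List.drop_eq_getElem_cons h
  have hsz := scanZero_drop nums i
  cases hm : minFrom nums (i+1) (S nums i) with
  | none =>
    rw [hm] at hsz
    simp only [Option.map_none] at hsz
    conv_lhs => rw [hd]
    rw [get_minimal_list]
    rw [← hd, hsz]
    simp [List.getElem!_eq_getElem?_getD, List.getElem?_eq_getElem h]
  | some k =>
    rw [hm] at hsz
    simp only [Option.map_some] at hsz
    have hk := minFrom_mem nums (i+1) (S nums i) k hm
    conv_lhs => rw [hd]
    rw [get_minimal_list]
    rw [← hd, hsz]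
    simp only
    have : (nums.drop i).drop (k - (i+1) + 1) = nums.drop k := by
      rw [List.drop_drop]
      congr 1
      omega
    rw [this]

theorem A_nil : get_minimal_list [] = [] := by rw [get_minimal_list]

theorem bwd_inv (nums : List Int) (i : Nat) : i ≤ nums.length →
    ∀ (seen : PySem.Dict Int (List Int)) (res : List Int),
    res = get_minimal_list (nums.drop i) →
    (∀ v, seen.get? v = (minFrom nums i v).map (fun k => get_minimal_list (nums.drop k))) →
    bwd nums (pfx 0 nums) i seen res = get_minimal_list nums := by
  induction i with
  | zero =>
    intro _ seen res hres _
    simpa [bwd] using hres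
  | succ i ih =>
    intro hi seen res hres hseen
    have hlt : i < nums.length := by omega
    simp only [bwd]
    rw [pfx_getBang nums i (le_of_lt hlt)]
    have hA := A_drop nums i hlt
    cases hs : seen.get? (S nums i) with
    | some r =>
      have := hseen (S nums i)
      rw [hs] at this
      obtain ⟨k, hk, hr⟩ : ∃ k, minFrom nums (i+1) (S nums i) = some k ∧
          get_minimal_list (nums.drop k) = r := by
        cases hmf : minFrom nums (i+1) (S nums i) with
        | none => rw [hmf] at this; simp at this
        | some k =>
          rw [hmf] at this
          simp only [Option.map_some, Option.some.injEq] at this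
          exact ⟨k, rfl, this.symm⟩
      rw [hk] at hA
      have hres' : r = get_minimal_list (nums.drop i) := by rw [hA]; exact hr.symm
      apply ih (le_of_lt hlt) _ _ hres'
      intro v
      rw [PySem.Dict.get?_insert, minFrom_step nums i v (le_of_lt hlt)]
      by_cases hv : v = S nums i
      · rw [if_pos hv, if_pos hv.symm]
        simp only [Option.map_some, Option.some.injEq]
        exact hres'.symm ▸ rfl
      · rw [if_neg hv, if_neg (fun hq => hv hq.symm), hseen v]
    | none =>
      have := hseen (S nums i)
      rw [hs] at this
      have hmf : minFrom nums (i+1) (S nums i) = none := by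
        cases hmf : minFrom nums (i+1) (S nums i) with
        | none => rfl
        | some k => rw [hmf] at this; simp at this
      rw [hmf] at hA
      have hres' : nums[i]! :: res = get_minimal_list (nums.drop i) := by
        rw [hA]; exact congrArg (nums[i]! :: ·) hres
      apply ih (le_of_lt hlt) _ _ hres'
      intro v
      rw [PySem.Dict.get?_insert, minFrom_step nums i v (le_of_lt hlt)]
      by_cases hv : v = S nums i
      · rw [if_pos hv, if_pos hv.symm]
        simp only [Option.map_some, Option.some.injEq]
        exact hres'.symm ▸ rfl
      · rw [if_neg hv, if_neg (fun hq => hv hq.symm), hseen v]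

theorem alt_eq (nums : List Int) : get_minimal_list_alt nums = get_minimal_list nums := by
  show bwd nums (pfx 0 nums) nums.length
      (PySem.Dict.empty.insert ((pfx 0 nums)[nums.length]!) []) [] = get_minimal_list nums
  rw [pfx_getBang nums nums.length le_rfl]
  apply bwd_inv nums nums.length le_rfl
  · rw [List.drop_length, A_nil]
  · intro v
    rw [PySem.Dict.get?_insert, minFrom_step nums nums.length v le_rfl]
    have hnone : minFrom nums (nums.length + 1) v = none := by
      unfold minFrom
      simp
    rw [hnone]
    by_cases hv : v = S nums nums.length
    · rw [if_pos hv, if_pos hv.symm]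
      simp [List.drop_length, A_nil]
    · rw [if_neg hv, if_neg (fun hq => hv hq.symm), PySem.Dict.get?_empty]
      simp

-- ===== VERDICT (by name: the statement is the Claim_ definition above) =====
theorem get_minimal_list_spec : Claim_equal_get_minimal_list := by
  intro nums _
  unfold Spec_get_minimal_list
  exact (alt_eq nums).symm
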